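-- pv_equiv track=rewrite | github.com/ho-kyle/python_portfolio | 098.py | int2hex
-- ===== SOURCE A (Python) =====
-- def int2hex(n):
--     a = ['10', '11', '12', '13', '14', '15']
--     b = ['A', 'B', 'C', 'D', 'E', 'F']
--     for i in range(6):
--         if n == a[i]:
--             n = b[i]
--             break
--     return n
-- ===== SOURCE B (Python) =====
-- def int2hex(n):
--     if n in ['10', '11', '12', '13', '14', '15']:
--         return chr(int(n) - 10 + ord('A'))
--     return n
-- ===== Notes on version B (the rewrite author's own statement) =====
-- stated objective: idiomatic
-- what changed: Replaces the index loop over two parallel tables with a single membership test plus a closed-form arithmetic chr(int(n)-10+ord('A')) computation of the hex letter.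
import Mathlib
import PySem

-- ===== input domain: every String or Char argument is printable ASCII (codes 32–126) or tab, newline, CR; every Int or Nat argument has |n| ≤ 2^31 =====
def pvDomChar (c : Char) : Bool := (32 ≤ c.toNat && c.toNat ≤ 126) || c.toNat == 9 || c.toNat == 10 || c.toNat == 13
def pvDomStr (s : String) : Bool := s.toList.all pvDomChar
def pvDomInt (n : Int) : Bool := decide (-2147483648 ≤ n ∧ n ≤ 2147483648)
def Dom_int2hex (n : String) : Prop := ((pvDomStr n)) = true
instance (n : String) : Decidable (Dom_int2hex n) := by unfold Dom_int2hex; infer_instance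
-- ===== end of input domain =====

-- B replaces the index loop over two parallel tables by a membership test and a
-- closed-form chr(int(n)-10+ord('A')) computation (idiomatic; same cost).


-- ===== PORT A =====
-- the loop 'for i in range(6): if n == a[i]: n = b[i]; break' : first match wins
def int2hexGo (n : String) : List (String × String) → String
  | [] => n
  | (x, y) :: rest => if n = x then y else int2hexGo n rest

def int2hex (n : String) : String :=
  let a := ["10", "11", "12", "13", "14", "15"]
  let b := ["A", "B", "C", "D", "E", "F"]
  int2hexGo n (a.zip b)

-- ===== PORT B =====
-- chr(int(n) - 10 + ord('A')); int(n) cannot fail under the membership guard, '.getD 0' is unreachable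
def int2hex_alt (n : String) : String :=
  if n ∈ ["10", "11", "12", "13", "14", "15"] then
    String.mk [Char.ofNat (((PySem.Int.ofStr? n).getD 0) - 10 + 65).toNat]
  else n

-- ===== PRECONDITION & SPEC =====
def Spec_int2hex (n : String) (out : String) : Prop := out = int2hex_alt n
instance (n : String) (out : String) : Decidable (Spec_int2hex n out) := by unfold Spec_int2hex; infer_instance

-- ===== CLAIM (what is proved, stated in full; the proofs are below) =====
def Claim_equal_int2hex : Prop := ∀ (n : String), Dom_int2hex n → Spec_int2hex n (int2hex n)

-- ===== LEMMAS AND PROOFS =====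

-- ===== VERDICT (by name: the statement is the Claim_ definition above) =====
theorem int2hex_spec : Claim_equal_int2hex := by
  intro n _
  unfold Spec_int2hex
  by_cases h0 : n = "10"; · subst h0; decide
  by_cases h1 : n = "11"; · subst h1; decide
  by_cases h2 : n = "12"; · subst h2; decide
  by_cases h3 : n = "13"; · subst h3; decide
  by_cases h4 : n = "14"; · subst h4; decide
  by_cases h5 : n = "15"; · subst h5; decide
  simp [int2hex, int2hexGo, int2hex_alt, h0, h1, h2, h3, h4, h5]
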